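-- pv_equiv track=rewrite | github.com/pyrustic/mikedoc | src/mikedoc/misc/__init__.py | parse_hyphenated_list
-- ===== SOURCE A (Python) =====
-- def parse_hyphenated_list(text):
--     key = ""
--     data = {key: list()}
--     for line in text.splitlines():
--         if line.startswith("-"):
--             line = line[1:]
--             cache = line.split(":", maxsplit=1)
--             if len(cache) == 1:
--                 key, value = "", cache[0].strip()
--                 data[key].append(value)
--             elif len(cache) == 2:
--                 key, value = cache[0].strip(), cache[1].strip()
--                 if key not in data:
--                     data[key] = list()
--                 data[key].append(value)
--         else:
--             if key != "":
--                 line = line.strip()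
--             data[key].append(line.strip())
--     return _merge_lines_in_hyphenated_list(data)
--
-- def _merge_lines_in_hyphenated_list(data):
--     cache = list()
--     for key, value in data.items():
--         if key == "":
--             val = "\n".join(value)
--         else:
--             val = " ".join(value)
--         val = val.strip()
--         if val:
--             data[key] = val
--         else:
--             cache.append(key)
--     for key in cache:
--         del data[key]
--     return data
-- ===== SOURCE B (Python) =====
-- def parse_hyphenated_list(text):
--     # Stage 1: tokenize every line into a flat (key, piece) event list.
--     events = []
--     key = ""
--     for line in text.splitlines():
--         if line.startswith("-"):
--             parts = line[1:].split(":", 1)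
--             if len(parts) == 2:
--                 key = parts[0].strip()
--                 piece = parts[1].strip()
--             else:
--                 key = ""
--                 piece = parts[0].strip()
--         else:
--             piece = line.strip()
--         events.append((key, piece))
--     # Stage 2: distinct keys in first-occurrence order, "" first.
--     keys = [""]
--     for k, _ in events:
--         if k not in keys:
--             keys.append(k)
--     # Stage 3: per key, gather its pieces from the whole event list, join, strip, keep if nonempty.
--     result = {}
--     for k in keys:
--         sep = "\n" if k == "" else " "
--         val = sep.join(p for ek, p in events if ek == k).strip()
--         if val:
--             result[k] = val
--     return result
-- ===== Notes on version B (the rewrite author's own statement) =====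
-- stated objective: alternative
-- what changed: Replaces A's online dict-of-lists accumulation plus separate merge helper by a staged pipeline: first tokenize all lines into a flat (key, piece) event list, then compute the distinct keys in first-occurrence order, then for each key gather its pieces from the whole event list by filtering, join, strip and keep if nonempty.
import Mathlib
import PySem

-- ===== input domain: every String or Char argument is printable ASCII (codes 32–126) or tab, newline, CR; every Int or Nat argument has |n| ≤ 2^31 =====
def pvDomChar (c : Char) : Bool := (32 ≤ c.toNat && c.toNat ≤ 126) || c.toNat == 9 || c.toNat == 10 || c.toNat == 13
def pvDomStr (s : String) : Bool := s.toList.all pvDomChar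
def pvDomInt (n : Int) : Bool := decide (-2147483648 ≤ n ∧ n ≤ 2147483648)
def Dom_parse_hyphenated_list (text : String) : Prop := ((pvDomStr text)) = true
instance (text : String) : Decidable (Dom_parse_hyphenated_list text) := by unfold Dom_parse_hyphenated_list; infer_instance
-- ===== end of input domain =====

-- B replaces A's online dict-of-lists accumulation plus the separate merge helper by a staged
-- pipeline: tokenize all lines into a flat (key, piece) event list, then the distinct keys in
-- first-occurrence order, then per key gather its pieces from the whole event list and join.


-- ===== PORT A =====
-- loop body of A's `for line in text.splitlines()` (state: current key, data)
def pvStepA (st : String × PySem.Dict String (List String)) (line : String) :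
    String × PySem.Dict String (List String) :=
  if PySem.Str.startswith line "-" then
    let line := PySem.Str.slice line (some 1) none
    -- line.split(":", maxsplit=1): sep ":" is nonempty, so splitMax? never returns none
    let cache := (PySem.Str.splitMax? line ":" 1).getD []
    if cache.length = 1 then
      let key := ""
      let value := PySem.Str.strip (cache.getD 0 "")
      -- data[key].append(value): key "" is always present, so modify's default [] is never used
      (key, st.2.modify key [] (· ++ [value]))
    else if cache.length = 2 then
      let key := PySem.Str.strip (cache.getD 0 "")
      let value := PySem.Str.strip (cache.getD 1 "")
      let data := if st.2.contains key then st.2 else st.2.insert key []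
      (key, data.modify key [] (· ++ [value]))
    else st
  else
    let line' := if st.1 ≠ "" then PySem.Str.strip line else line
    -- data[key].append(line.strip()): the current key is always present in data
    (st.1, st.2.modify st.1 [] (· ++ [PySem.Str.strip line']))

-- port of _merge_lines_in_hyphenated_list; the Python dict's values change type list→str in
-- place, modelled as building the string-valued dict by the same loop (overwrite order = item
-- order) and then replaying the deletions of the cached keys
def pvMergeA (data : PySem.Dict String (List String)) : List (String × String) :=
  let st : PySem.Dict String String × List String :=
    data.items.foldl (fun st kv =>
      let val := if kv.1 = "" then PySem.Str.join "\n" kv.2 else PySem.Str.join " " kv.2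
      let val := PySem.Str.strip val
      if val ≠ "" then (st.1.insert kv.1 val, st.2) else (st.1, st.2 ++ [kv.1]))
      (PySem.Dict.empty, [])
  (st.2.foldl (fun d k => d.erase k) st.1).items

def parse_hyphenated_list (text : String) : List (String × String) :=
  pvMergeA ((PySem.Str.splitlines text).foldl pvStepA ("", PySem.Dict.empty.insert "" [])).2

-- ===== PORT B =====
-- Stage 1 loop body: tokenize one line, keeping the current key, appending one event
def pvTokStep (st : String × List (String × String)) (line : String) :
    String × List (String × String) :=
  if PySem.Str.startswith line "-" then
    let parts := (PySem.Str.splitMax? (PySem.Str.slice line (some 1) none) ":" 1).getD []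
    if parts.length = 2 then
      let k := PySem.Str.strip (parts.getD 0 "")
      (k, st.2 ++ [(k, PySem.Str.strip (parts.getD 1 ""))])
    else
      ("", st.2 ++ [("", PySem.Str.strip (parts.getD 0 ""))])
  else
    (st.1, st.2 ++ [(st.1, PySem.Str.strip line)])

-- Stage 2: distinct keys in first-occurrence order, "" first
def pvKeysB (events : List (String × String)) : List String :=
  events.foldl (fun ks e => if e.1 ∈ ks then ks else ks ++ [e.1]) [""]

-- the pieces belonging to key k: `(p for ek, p in events if ek == k)`
def pvPieces (events : List (String × String)) (k : String) : List String :=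
  (events.filter (fun e => e.1 == k)).map (·.2)

-- Stage 3: per key, join its gathered pieces, strip, keep if nonempty
def pvResultB (events : List (String × String)) (keys : List String) :
    PySem.Dict String String :=
  keys.foldl (fun res k =>
    let sep := if k = "" then "\n" else " "
    let val := PySem.Str.strip (PySem.Str.join sep (pvPieces events k))
    if val ≠ "" then res.insert k val else res) PySem.Dict.empty

def parse_hyphenated_list_alt (text : String) : List (String × String) :=
  let events := ((PySem.Str.splitlines text).foldl pvTokStep ("", [])).2
  (pvResultB events (pvKeysB events)).items

-- ===== PRECONDITION & SPEC =====
def Spec_parse_hyphenated_list (text : String) (out : List (String × String)) : Prop := out = parse_hyphenated_list_alt text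
instance (text : String) (out : List (String × String)) : Decidable (Spec_parse_hyphenated_list text out) := by unfold Spec_parse_hyphenated_list; infer_instance

-- ===== CLAIM (what is proved, stated in full; the proofs are below) =====
def Claim_equal_parse_hyphenated_list : Prop := ∀ (text : String), Dom_parse_hyphenated_list text → Spec_parse_hyphenated_list text (parse_hyphenated_list text)

-- ===== LEMMAS AND PROOFS =====

-- the grouped view of the event list: each distinct key with all its pieces, keys in order
def pvGroup (ev : List (String × String)) : List (String × List String) :=
  (pvKeysB ev).map (fun k => (k, pvPieces ev k))

theorem pv_dropWhile_idem (p : Char → Bool) (l : List Char) :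
    List.dropWhile p (List.dropWhile p l) = List.dropWhile p l := by
  induction l with
  | nil => simp
  | cons c cs ih =>
    by_cases hc : p c
    · simp only [List.dropWhile_cons_of_pos hc]; exact ih
    · simp [List.dropWhile_cons_of_neg hc]

theorem pv_dropWhile_prefix (p : Char → Bool) (l m : List Char)
    (h : List.dropWhile p l = l) (hp : m <+: l) : List.dropWhile p m = m := by
  rw [List.dropWhile_eq_self_iff] at h ⊢
  intro hl
  have hll : 0 < l.length := lt_of_lt_of_le hl hp.length_le
  have h0 : m[0] = l[0] := by
    obtain ⟨t, rfl⟩ := hp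
    exact (List.getElem_append_left _).symm
  rw [h0]; exact h _

theorem pv_rstrip_prefix (x : List Char) : PySem.Chars.rstrip x <+: x := by
  unfold PySem.Chars.rstrip
  have := List.dropWhile_suffix (l := x.reverse) PySem.Chars.isspace
  simpa using List.reverse_prefix.mpr this

theorem pv_strip_idem (l : List Char) : PySem.Chars.strip (PySem.Chars.strip l) = PySem.Chars.strip l := by
  unfold PySem.Chars.strip
  have h1 : PySem.Chars.lstrip (PySem.Chars.rstrip (PySem.Chars.lstrip l)) = PySem.Chars.rstrip (PySem.Chars.lstrip l) := by
    unfold PySem.Chars.lstrip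
    exact pv_dropWhile_prefix _ _ _ (pv_dropWhile_idem _ l) (pv_rstrip_prefix _)
  rw [h1]
  unfold PySem.Chars.rstrip
  simp [pv_dropWhile_idem]

theorem pv_strip_strip (s : String) : PySem.Str.strip (PySem.Str.strip s) = PySem.Str.strip s := by
  simp [PySem.Str.strip, pv_strip_idem]

theorem pv_go_len (sep : List Char) (fuel : Nat) : ∀ (m : Nat) (l cur : List Char) (acc : List (List Char)),
    acc.length + 1 ≤ (PySem.Chars.splitOnMax.go sep fuel m l cur acc).length ∧
    (PySem.Chars.splitOnMax.go sep fuel m l cur acc).length ≤ acc.length + m + 1 := by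
  induction fuel with
  | zero => intro m l cur acc; simp [PySem.Chars.splitOnMax.go]
  | succ fuel ih =>
    intro m l cur acc
    cases l with
    | nil => simp [PySem.Chars.splitOnMax.go]
    | cons c rest =>
      rw [PySem.Chars.splitOnMax.go]
      by_cases hm : m = 0
      · simp [hm]
      · simp only [if_neg hm]
        by_cases hp : sep.isPrefixOf (c :: rest)
        · simp only [if_pos hp]
          have := ih (m - 1) (List.drop sep.length (c :: rest)) [] (cur.reverse :: acc)
          constructor
          · calc acc.length + 1 ≤ (cur.reverse :: acc).length + 1 := by simp
              _ ≤ _ := this.1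
          · calc _ ≤ (cur.reverse :: acc).length + (m-1) + 1 := this.2
              _ ≤ acc.length + m + 1 := by simp; omega
        · simp only [if_neg hp]
          exact ih m rest (c :: cur) acc

theorem pv_cache_len (s : String) :
    ((PySem.Str.splitMax? s ":" 1).getD []).length = 1 ∨
    ((PySem.Str.splitMax? s ":" 1).getD []).length = 2 := by
  have h := pv_go_len [':'] (s.toList.length + 1) 1 s.toList [] []
  simp only [List.length_nil, String.length_toList] at h
  simp [PySem.Str.splitMax?, PySem.Chars.splitMax?, PySem.Chars.splitOnMax, List.length_map]
  omega

-- the (key, piece) both loop bodies extract from a line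
def pvKP (k : String) (line : String) : String × String :=
  if PySem.Str.startswith line "-" then
    let cache := (PySem.Str.splitMax? (PySem.Str.slice line (some 1) none) ":" 1).getD []
    if cache.length = 2 then
      (PySem.Str.strip (cache.getD 0 ""), PySem.Str.strip (cache.getD 1 ""))
    else ("", PySem.Str.strip (cache.getD 0 ""))
  else (k, PySem.Str.strip line)

def pvUpdA (d : PySem.Dict String (List String)) (k v : String) : PySem.Dict String (List String) :=
  (if d.contains k then d else d.insert k []).modify k [] (· ++ [v])

theorem pvStepA_eq (st : String × PySem.Dict String (List String)) (line : String)
    (hc0 : st.2.contains "" = true) (hck : st.2.contains st.1 = true) :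
    pvStepA st line = ((pvKP st.1 line).1, pvUpdA st.2 (pvKP st.1 line).1 (pvKP st.1 line).2) := by
  unfold pvStepA pvUpdA pvKP
  by_cases hs : PySem.Str.startswith line "-" = true
  · simp only [hs, if_true]
    rcases pv_cache_len (PySem.Str.slice line (some 1) none) with hl | hl
    · simp only [hl]
      norm_num
      rw [if_pos hc0]
    · simp only [hl]
      norm_num
  · have hs' : (PySem.Str.startswith line "-") = false := by simpa using hs
    simp only [hs', Bool.false_eq_true, if_false]
    rw [if_pos hck]
    by_cases h0 : st.1 = ""
    · simp [h0]
    · simp [h0, pv_strip_strip]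

theorem pvTokStep_eq (st : String × List (String × String)) (line : String) :
    pvTokStep st line = ((pvKP st.1 line).1, st.2 ++ [pvKP st.1 line]) := by
  by_cases hs : PySem.Str.startswith line "-" = true
  · have hs2 : PySem.Chars.startswith line.toList ['-'] = true := hs
    by_cases hl : ((PySem.Str.splitMax? (PySem.Str.slice line (some 1) none) ":" 1).getD []).length = 2
    · simp [pvTokStep, pvKP, hs2, hl]
    · simp [pvTokStep, pvKP, hs2, hl]
  · have hs2 : PySem.Chars.startswith line.toList ['-'] = false := by simpa using hs
    simp [pvTokStep, pvKP, hs2]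

-- membership in the dedup fold is preserved and every event key appears
theorem pv_keys_mono (E : List (String × String)) : ∀ (init : List String) (x : String),
    x ∈ init → x ∈ E.foldl (fun ks e => if e.1 ∈ ks then ks else ks ++ [e.1]) init := by
  induction E with
  | nil => intro init x h; exact h
  | cons e rest ih =>
    intro init x h
    simp only [List.foldl_cons]
    by_cases he : e.1 ∈ init
    · rw [if_pos he]; exact ih init x h
    · rw [if_neg he]; exact ih _ x (by simp [h])

theorem pv_keys_of_event (E : List (String × String)) : ∀ (init : List String) (e : String × String),
    e ∈ E → e.1 ∈ E.foldl (fun ks e => if e.1 ∈ ks then ks else ks ++ [e.1]) init := by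
  induction E with
  | nil => intro _ _ h; simp at h
  | cons a rest ih =>
    intro init e he
    simp only [List.foldl_cons]
    rcases List.mem_cons.mp he with h | h
    · subst h
      by_cases ha : e.1 ∈ init
      · rw [if_pos ha]; exact pv_keys_mono rest init e.1 ha
      · rw [if_neg ha]; exact pv_keys_mono rest _ e.1 (by simp)
    · by_cases ha : a.1 ∈ init
      · rw [if_pos ha]; exact ih init e h
      · rw [if_neg ha]; exact ih _ e h

theorem pv_mem_keysB (E : List (String × String)) (e : String × String) (h : e ∈ E) :
    e.1 ∈ pvKeysB E := pv_keys_of_event E [""] e h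

theorem pvKeysB_append (E : List (String × String)) (e : String × String) :
    pvKeysB (E ++ [e]) = if e.1 ∈ pvKeysB E then pvKeysB E else pvKeysB E ++ [e.1] := by
  unfold pvKeysB
  rw [List.foldl_append]
  rfl

theorem pv_pieces_append (E : List (String × String)) (k v k' : String) :
    pvPieces (E ++ [(k, v)]) k' = pvPieces E k' ++ if k' = k then [v] else [] := by
  unfold pvPieces
  rw [List.filter_append]
  by_cases h : k' = k
  · simp [h]
  · have hb : (k == k') = false := beq_eq_false_iff_ne.mpr (fun he => h he.symm)
    simp [hb, h]

theorem pv_pieces_nil (E : List (String × String)) (k : String) (h : k ∉ pvKeysB E) :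
    pvPieces E k = [] := by
  unfold pvPieces
  rw [List.filter_eq_nil_iff.mpr, List.map_nil]
  intro e he hk
  exact h (by simpa using (beq_iff_eq.mp hk) ▸ pv_mem_keysB E e he)

theorem pv_item_eq (E : List (String × String)) (p : String × List String)
    (h : p ∈ pvGroup E) : p = (p.1, pvPieces E p.1) := by
  obtain ⟨k, _, rfl⟩ := List.mem_map.mp h
  rfl

theorem pvGroup_append_mem (E : List (String × String)) (k v : String) (h : k ∈ pvKeysB E) :
    pvGroup (E ++ [(k, v)]) = (pvGroup E).map (fun p => if p.1 = k then (p.1, p.2 ++ [v]) else p) := by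
  unfold pvGroup
  rw [pvKeysB_append, if_pos h, List.map_map]
  apply List.map_congr_left
  intro k' _
  by_cases hk : k' = k
  · simp [Function.comp, pv_pieces_append, hk]
  · simp [Function.comp, pv_pieces_append, hk]

theorem pvGroup_append_not (E : List (String × String)) (k v : String) (h : k ∉ pvKeysB E) :
    pvGroup (E ++ [(k, v)]) = pvGroup E ++ [(k, [v])] := by
  unfold pvGroup
  rw [pvKeysB_append, if_neg h, List.map_append]
  congr 1
  · apply List.map_congr_left
    intro k' hk'
    have : k' ≠ k := fun he => h (he ▸ hk')
    simp [pv_pieces_append, this]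
  · simp only [List.map_cons, List.map_nil, pv_pieces_append, pv_pieces_nil E k h]
    simp

theorem pv_keys_group (d : PySem.Dict String (List String)) (E : List (String × String))
    (h : d.items = pvGroup E) : d.keys = pvKeysB E := by
  show d.items.map (·.1) = _
  rw [h]
  unfold pvGroup
  rw [List.map_map]
  have hcomp : ((fun p : String × List String => p.1) ∘ fun k => (k, pvPieces E k)) = fun k => k := rfl
  rw [hcomp, List.map_id']

theorem pv_contains_true (d : PySem.Dict String (List String)) (E : List (String × String))
    (h : d.items = pvGroup E) (k : String) (hk : k ∈ pvKeysB E) : d.contains k = true := by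
  rw [PySem.Dict.contains_iff_mem_keys, pv_keys_group d E h]
  exact hk

theorem pv_contains_false (d : PySem.Dict String (List String)) (E : List (String × String))
    (h : d.items = pvGroup E) (k : String) (hk : k ∉ pvKeysB E) : d.contains k = false := by
  by_contra hc
  have : d.contains k = true := by simpa using hc
  rw [PySem.Dict.contains_iff_mem_keys, pv_keys_group d E h] at this
  exact hk this

theorem pv_updA_group (d : PySem.Dict String (List String)) (E : List (String × String))
    (k v : String) (hit : d.items = pvGroup E) (hnd : d.keys.Nodup) :
    (pvUpdA d k v).items = pvGroup (E ++ [(k, v)]) ∧ (pvUpdA d k v).keys.Nodup := by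
  unfold pvUpdA
  by_cases hk : k ∈ pvKeysB E
  · have hc : d.contains k = true := pv_contains_true d E hit k hk
    rw [if_pos hc]
    have hmem : (k, pvPieces E k) ∈ d.items := by
      rw [hit]; exact List.mem_map.mpr ⟨k, hk, rfl⟩
    have hget : d.get? k = some (pvPieces E k) := PySem.Dict.get?_of_mem_items d hmem hnd
    have hgetD : d.getD k [] = pvPieces E k := PySem.Dict.getD_of_get?_eq_some d [] hget
    have hmod : d.modify k [] (· ++ [v]) = d.insert k (pvPieces E k ++ [v]) := by
      show d.insert k (d.getD k [] ++ [v]) = _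
      rw [hgetD]
    rw [hmod]
    constructor
    · rw [PySem.Dict.items_insert_of_contains d _ hc, hit, pvGroup_append_mem E k v hk]
      apply List.map_congr_left
      intro p hp
      by_cases hpk : p.1 = k
      · have hpe := pv_item_eq E p hp
        simp only [hpk, beq_self_eq_true, if_true]
        rw [hpe]
        simp [hpk]
      · simp [hpk]
    · exact PySem.Dict.nodup_keys_insert d k _ hnd
  · have hc : d.contains k = false := pv_contains_false d E hit k hk
    rw [if_neg (by simp [hc])]
    have hmod : (d.insert k []).modify k [] (· ++ [v]) = d.insert k [v] := by
      show (d.insert k []).insert k ((d.insert k []).getD k [] ++ [v]) = _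
      rw [PySem.Dict.getD_insert_self, PySem.Dict.insert_insert_self]
      simp
    rw [hmod]
    constructor
    · rw [PySem.Dict.items_insert_of_not_contains d _ hc, hit, pvGroup_append_not E k v hk]
    · exact PySem.Dict.nodup_keys_insert d k _ hnd

-- the main loop correspondence: A's fold state tracks the grouped view of B's event list
theorem pv_fold (L : List String) : ∀ (st : String × PySem.Dict String (List String))
    (e : String × List (String × String)),
    st.1 = e.1 → st.2.items = pvGroup e.2 → st.2.keys.Nodup → e.1 ∈ pvKeysB e.2 →
    (L.foldl pvStepA st).2.items = pvGroup (L.foldl pvTokStep e).2 ∧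
    (L.foldl pvStepA st).2.keys.Nodup := by
  induction L with
  | nil => intro st e _ h2 h3 _; exact ⟨h2, h3⟩
  | cons line rest ih =>
    intro st e h1 h2 h3 h4
    simp only [List.foldl_cons]
    have hc0 : st.2.contains "" = true :=
      pv_contains_true st.2 e.2 h2 "" (pv_keys_mono e.2 [""] "" (by simp))
    have hck : st.2.contains st.1 = true := pv_contains_true st.2 e.2 h2 st.1 (h1 ▸ h4)
    rw [pvStepA_eq st line hc0 hck, pvTokStep_eq e line, h1]
    obtain ⟨hu1, hu2⟩ := pv_updA_group st.2 e.2 (pvKP e.1 line).1 (pvKP e.1 line).2 h2 h3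
    refine ih _ _ rfl hu1 hu2 ?_
    exact pv_mem_keysB _ (pvKP e.1 line) (by simp)

-- A's merged value / B's kept entry for one grouped (key, pieces) pair
def pvFA (kv : String × List String) : Option (String × String) :=
  let val := PySem.Str.strip (if kv.1 = "" then PySem.Str.join "\n" kv.2 else PySem.Str.join " " kv.2)
  if val ≠ "" then some (kv.1, val) else none

def pvFB (kv : String × List String) : Option (String × String) :=
  let sep := if kv.1 = "" then "\n" else " "
  let val := PySem.Str.strip (PySem.Str.join sep kv.2)
  if val ≠ "" then some (kv.1, val) else none

theorem pvFA_eq_FB : pvFA = pvFB := by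
  funext kv
  unfold pvFA pvFB
  by_cases h : kv.1 = "" <;> simp [h]

theorem pv_erase_of_not_contains (d : PySem.Dict String String) (k : String)
    (h : d.contains k = false) : d.erase k = d := by
  apply PySem.Dict.ext
  show d.items.filter _ = d.items
  apply List.filter_eq_self.mpr
  intro p hp
  have := List.any_eq_false.mp h p hp
  simpa using this

theorem pv_erases_noop (c : List String) : ∀ (d : PySem.Dict String String),
    (∀ x ∈ c, d.contains x = false) → c.foldl (fun d k => d.erase k) d = d := by
  induction c with
  | nil => intro d _; rfl
  | cons x xs ih =>
    intro d h
    rw [List.foldl_cons, pv_erase_of_not_contains d x (h x (by simp))]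
    exact ih d (fun y hy => h y (by simp [hy]))

theorem pv_mergeA_fold : ∀ (l : List (String × List String)) (d0 : PySem.Dict String String) (c0 : List String),
    (∀ x ∈ c0, d0.contains x = false ∧ x ∉ l.map (·.1)) →
    (∀ kv ∈ l, d0.contains kv.1 = false) → (l.map (·.1)).Nodup →
    (let st := l.foldl (fun st kv =>
        let val := if kv.1 = "" then PySem.Str.join "\n" kv.2 else PySem.Str.join " " kv.2
        let val := PySem.Str.strip val
        if val ≠ "" then (st.1.insert kv.1 val, st.2) else (st.1, st.2 ++ [kv.1]))
        (d0, c0)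
     (st.2.foldl (fun d k => d.erase k) st.1).items) = d0.items ++ l.filterMap pvFA := by
  intro l
  induction l with
  | nil =>
    intro d0 c0 h1 _ _
    simp only [List.foldl_nil, List.filterMap_nil, List.append_nil]
    rw [pv_erases_noop c0 d0 (fun x hx => (h1 x hx).1)]
  | cons kv l ih =>
    intro d0 c0 h1 h2 h3
    simp only [List.foldl_cons]
    by_cases hval : PySem.Str.strip (if kv.1 = "" then PySem.Str.join "\n" kv.2 else PySem.Str.join " " kv.2) ≠ ""
    · simp only [if_pos hval]
      have hfresh : d0.contains kv.1 = false := h2 kv (by simp)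
      have := ih (d0.insert kv.1 (PySem.Str.strip (if kv.1 = "" then PySem.Str.join "\n" kv.2 else PySem.Str.join " " kv.2))) c0
        (by
          intro x hx
          obtain ⟨hxc, hxl⟩ := h1 x hx
          constructor
          · rw [PySem.Dict.contains_insert]
            have : x ≠ kv.1 := by intro he; exact hxl (by simp [he])
            simp [this, hxc]
          · intro hm; exact hxl (by simp [hm]))
        (by
          intro p hp
          rw [PySem.Dict.contains_insert]
          have : p.1 ≠ kv.1 := by
            intro he
            have : kv.1 ∈ l.map (·.1) := by
              rw [← he]; exact List.mem_map.mpr ⟨p, hp, rfl⟩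
            exact (List.nodup_cons.mp h3).1 this
          simp [this, h2 p (by simp [hp])])
        (List.nodup_cons.mp h3).2
      rw [this, PySem.Dict.items_insert_of_not_contains d0 _ hfresh]
      have hfa : pvFA kv = some (kv.1, PySem.Str.strip (if kv.1 = "" then PySem.Str.join "\n" kv.2 else PySem.Str.join " " kv.2)) := by
        simp [pvFA, hval]
      rw [List.filterMap_cons, hfa]
      simp
    · simp only [if_neg hval]
      have := ih d0 (c0 ++ [kv.1])
        (by
          intro x hx
          rcases List.mem_append.mp hx with hx0 | hx1
          · obtain ⟨hxc, hxl⟩ := h1 x hx0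
            exact ⟨hxc, fun hm => hxl (by simp [hm])⟩
          · have hxk : x = kv.1 := by simpa using hx1
            subst hxk
            exact ⟨h2 kv (by simp), (List.nodup_cons.mp h3).1⟩)
        (fun p hp => h2 p (by simp [hp]))
        (List.nodup_cons.mp h3).2
      rw [this]
      have hfa : pvFA kv = none := by simp [pvFA] at hval ⊢; exact hval
      rw [List.filterMap_cons, hfa]

theorem pv_resultB_fold : ∀ (l : List (String × List String)) (r0 : PySem.Dict String String),
    (∀ kv ∈ l, r0.contains kv.1 = false) → (l.map (·.1)).Nodup →
    (l.foldl (fun res kv =>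
        let sep := if kv.1 = "" then "\n" else " "
        let val := PySem.Str.strip (PySem.Str.join sep kv.2)
        if val ≠ "" then res.insert kv.1 val else res) r0).items
      = r0.items ++ l.filterMap pvFB := by
  intro l
  induction l with
  | nil => intro r0 _ _; simp
  | cons kv l ih =>
    intro r0 h1 h2
    simp only [List.foldl_cons]
    by_cases hs : PySem.Str.strip (PySem.Str.join (if kv.1 = "" then "\n" else " ") kv.2) ≠ ""
    · have hfresh : r0.contains kv.1 = false := h1 kv (by simp)
      have := ih (r0.insert kv.1 (PySem.Str.strip (PySem.Str.join (if kv.1 = "" then "\n" else " ") kv.2)))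
        (by
          intro p hp
          rw [PySem.Dict.contains_insert]
          have : p.1 ≠ kv.1 := by
            intro he
            have : kv.1 ∈ l.map (·.1) := by
              rw [← he]; exact List.mem_map.mpr ⟨p, hp, rfl⟩
            exact (List.nodup_cons.mp h2).1 this
          simp [this, h1 p (by simp [hp])])
        (List.nodup_cons.mp h2).2
      have hfb : pvFB kv = some (kv.1, PySem.Str.strip (PySem.Str.join (if kv.1 = "" then "\n" else " ") kv.2)) := by
        simp [pvFB, hs]
      rw [List.filterMap_cons, hfb]
      simp only [if_pos hs]
      rw [this, PySem.Dict.items_insert_of_not_contains r0 _ hfresh]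
      simp
    · have hfb : pvFB kv = none := by simp [pvFB] at hs ⊢; exact hs
      rw [List.filterMap_cons, hfb]
      simp only [if_neg hs]
      exact ih r0 (fun p hp => h1 p (by simp [hp])) (List.nodup_cons.mp h2).2

theorem pv_final (d : PySem.Dict String (List String)) (E : List (String × String))
    (hit : d.items = pvGroup E) (hnd : d.keys.Nodup) :
    pvMergeA d = (pvResultB E (pvKeysB E)).items := by
  have hndl : (d.items.map (·.1)).Nodup := hnd
  have hA := pv_mergeA_fold d.items PySem.Dict.empty [] (by simp) (by intro kv _; rfl) hndl
  have hgnd : ((pvGroup E).map (·.1)).Nodup := by rw [← hit]; exact hndl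
  have hB := pv_resultB_fold (pvGroup E) PySem.Dict.empty (by intro kv _; rfl) hgnd
  have hres : pvResultB E (pvKeysB E) = (pvGroup E).foldl (fun res kv =>
      let sep := if kv.1 = "" then "\n" else " "
      let val := PySem.Str.strip (PySem.Str.join sep kv.2)
      if val ≠ "" then res.insert kv.1 val else res) PySem.Dict.empty := by
    unfold pvResultB pvGroup
    rw [List.foldl_map]
  unfold pvMergeA
  rw [hA, hres, hB, hit, pvFA_eq_FB]

-- ===== VERDICT (by name: the statement is the Claim_ definition above) =====
theorem parse_hyphenated_list_spec : Claim_equal_parse_hyphenated_list := by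
  intro text _hdom
  show parse_hyphenated_list text = parse_hyphenated_list_alt text
  unfold parse_hyphenated_list parse_hyphenated_list_alt
  obtain ⟨hit, hnd⟩ := pv_fold (PySem.Str.splitlines text)
    ("", PySem.Dict.empty.insert "" []) ("", [])
    rfl (by decide) (by decide) (by decide)
  exact pv_final _ _ hit hnd
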